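-- pv_equiv track=rewrite | github.com/leixiaohui-1974/chs-books-v2 | books/fix_orphan_images.py | find_second_last_para
-- ===== SOURCE A (Python) =====
-- def find_second_last_para(lines: list) -> int:
--     para_starts = []
--     in_para = False
--     for i, line in enumerate(lines):
--         if line.strip():
--             if not in_para:
--                 para_starts.append(i)
--                 in_para = True
--         else:
--             in_para = False
--     if len(para_starts) >= 2:
--         return para_starts[-2]
--     elif para_starts:
--         return para_starts[-1]
--     return max(0, len(lines) - 2)
-- ===== SOURCE B (Python) =====
-- def find_second_last_para(lines: list) -> int:
--     # Reverse scan: a paragraph start is a non-blank line whose predecessor is blank (or index 0).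
--     last = None
--     for i in range(len(lines) - 1, -1, -1):
--         if lines[i].strip() and (i == 0 or not lines[i - 1].strip()):
--             if last is not None:
--                 return i  # second start found from the end = second-to-last paragraph
--             last = i
--     if last is not None:
--         return last
--     return max(0, len(lines) - 2)
-- ===== Notes on version B (the rewrite author's own statement) =====
-- stated objective: alternative
-- what changed: Replaces the forward pass that builds the full list of paragraph-start indices with a backward scan keeping only the most recent start and returning as soon as the second one is found.
import Mathlib
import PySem

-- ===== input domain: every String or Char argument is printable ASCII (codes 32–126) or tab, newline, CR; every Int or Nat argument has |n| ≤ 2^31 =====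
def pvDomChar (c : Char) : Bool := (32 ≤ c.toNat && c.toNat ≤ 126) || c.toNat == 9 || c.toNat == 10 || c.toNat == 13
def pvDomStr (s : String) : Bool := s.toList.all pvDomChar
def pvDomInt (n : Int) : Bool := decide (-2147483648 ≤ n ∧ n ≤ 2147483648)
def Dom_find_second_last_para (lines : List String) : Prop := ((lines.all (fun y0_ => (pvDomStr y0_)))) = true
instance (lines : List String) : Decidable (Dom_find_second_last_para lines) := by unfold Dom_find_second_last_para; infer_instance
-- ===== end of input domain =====

-- B replaces A's forward pass (building the whole start-index list) by a backward scan with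
-- O(1) state and early exit; equivalence of the return values is proved (no argument is mutated).

-- ===== PORT A =====
-- A's for-loop as structural recursion over the lines, carrying (index, para_starts, in_para).
def aGo : List String → Nat → List Int → Bool → List Int
  | [], _, starts, _ => starts
  | l :: rest, i, starts, inPara =>
    if PySem.Str.strip l ≠ "" then
      if !inPara then aGo rest (i + 1) (starts ++ [(i : Int)]) true
      else aGo rest (i + 1) starts true
    else aGo rest (i + 1) starts false

def find_second_last_para (lines : List String) : Int :=
  let starts := aGo lines 0 [] false
  if starts.length ≥ 2 then starts.getD (starts.length - 2) 0   -- para_starts[-2]; in range by the guard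
  else if starts ≠ [] then starts.getLastD 0                    -- para_starts[-1]; nonempty by the guard
  else max 0 ((lines.length : Int) - 2)

-- ===== PORT B =====
-- B's reverse loop: altGo lines i acc processes indices i-1, i-2, …, 0 (all in range, so getD is exact).
def altGo (lines : List String) : Nat → Option Int → Int
  | 0, some j => j
  | 0, none => max 0 ((lines.length : Int) - 2)
  | i + 1, acc =>
    if PySem.Str.strip (lines.getD i "") ≠ "" ∧
       (i = 0 ∨ ¬ PySem.Str.strip (lines.getD (i - 1) "") ≠ "") then
      match acc with
      | some _ => (i : Int)
      | none => altGo lines i (some (i : Int))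
    else altGo lines i acc

def find_second_last_para_alt (lines : List String) : Int :=
  altGo lines lines.length none

-- ===== PRECONDITION & SPEC =====
def Spec_find_second_last_para (lines : List String) (out : Int) : Prop := out = find_second_last_para_alt lines
instance (lines : List String) (out : Int) : Decidable (Spec_find_second_last_para lines out) := by unfold Spec_find_second_last_para; infer_instance

-- ===== CLAIM (what is proved, stated in full; the proofs are below) =====
def Claim_equal_find_second_last_para : Prop := ∀ (lines : List String), Dom_find_second_last_para lines → Spec_find_second_last_para lines (find_second_last_para lines)

-- ===== LEMMAS AND PROOFS =====

-- nb lines i: line i is non-blank; pstart lines i: line i starts a paragraph.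
def nb (lines : List String) (i : Nat) : Bool := PySem.Str.strip (lines.getD i "") != ""
def pstart (lines : List String) (i : Nat) : Bool := nb lines i && (decide (i = 0) || !nb lines (i - 1))
-- value of in_para when A is about to process index k
def pvPrev (lines : List String) (k : Nat) : Bool := if k = 0 then false else nb lines (k - 1)
-- the list A's loop builds, characterised as a filter
def J (lines : List String) : List Nat := (List.range lines.length).filter (pstart lines)

-- what B computes from the descending list of paragraph starts below i and the accumulator
def bSpec (lines : List String) : List Nat → Option Int → Int
  | [], some j => j
  | [], none => max 0 ((lines.length : Int) - 2)
  | j1 :: _, some _ => (j1 : Int)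
  | [j1], none => (j1 : Int)
  | _ :: j2 :: _, none => (j2 : Int)


lemma aGo_cons (l : String) (rest : List String) (i : Nat) (starts : List Int) (inPara : Bool) :
    aGo (l :: rest) i starts inPara =
      if PySem.Str.strip l ≠ "" then
        (if inPara then aGo rest (i + 1) starts true
         else aGo rest (i + 1) (starts ++ [(i : Int)]) true)
      else aGo rest (i + 1) starts false := by
  cases inPara <;> simp [aGo]

lemma aGo_acc : ∀ (rest : List String) (i : Nat) (starts : List Int) (inPara : Bool),
    aGo rest i starts inPara = starts ++ aGo rest i [] inPara := by
  intro rest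
  induction rest with
  | nil => intro i starts inPara; simp [aGo]
  | cons l rest ih =>
    intro i starts inPara
    rw [aGo_cons, aGo_cons]
    by_cases h : PySem.Str.strip l ≠ ""
    · rw [if_pos h, if_pos h]
      cases inPara with
      | false =>
        simp only [Bool.false_eq_true, if_false]
        rw [ih (i + 1) (starts ++ [(i : Int)]) true, ih (i + 1) ([] ++ [(i : Int)]) true]
        simp
      | true => simp only [if_true]; exact ih (i + 1) starts true
    · rw [if_neg h, if_neg h]; exact ih (i + 1) starts false

lemma aGo_filter (lines : List String) : ∀ (m k : Nat), k + m = lines.length →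
    aGo (lines.drop k) k [] (pvPrev lines k)
      = ((List.range' k m).filter (pstart lines)).map Int.ofNat := by
  intro m
  induction m with
  | zero =>
    intro k hk
    have hnil : lines.drop k = [] := by
      apply List.drop_eq_nil_of_le; omega
    simp [hnil, aGo]
  | succ m ih =>
    intro k hk
    have hklt : k < lines.length := by omega
    have hdrop : lines.drop k = lines[k] :: lines.drop (k + 1) :=
      List.drop_eq_getElem_cons hklt
    have hgd : lines.getD k "" = lines[k] := List.getD_eq_getElem lines "" hklt
    have hpv : pvPrev lines (k + 1) = nb lines k := by simp [pvPrev]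
    have hrange : List.range' k (m + 1) = k :: List.range' (k + 1) m := List.range'_succ
    rw [hdrop, hrange, aGo_cons]
    by_cases hnb : PySem.Str.strip lines[k] ≠ ""
    · have hnbk : nb lines k = true := by
        unfold nb; rw [hgd]; simpa using hnb
      have hps : pstart lines k = (!pvPrev lines k) := by
        unfold pstart pvPrev
        rw [hnbk]
        by_cases h0 : k = 0 <;> simp [h0]
      have hpv1 : pvPrev lines (k + 1) = true := by rw [hpv, hnbk]
      rw [if_pos hnb]
      cases hpvk : pvPrev lines k with
      | false =>
        have hpt : pstart lines k = true := by rw [hps, hpvk]; rfl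
        simp only [Bool.false_eq_true, if_false]
        rw [aGo_acc, ← hpv1, ih (k + 1) (by omega)]
        simp [hpt]
      | true =>
        have hpf : pstart lines k = false := by rw [hps, hpvk]; rfl
        simp only [if_true]
        rw [← hpv1, ih (k + 1) (by omega)]
        simp [hpf]
    · have hnbk : nb lines k = false := by
        unfold nb; rw [hgd]; simpa using hnb
      have hps : pstart lines k = false := by
        unfold pstart; rw [hnbk]; rfl
      have hpv0 : pvPrev lines (k + 1) = false := by rw [hpv, hnbk]
      rw [if_neg hnb, ← hpv0, ih (k + 1) (by omega)]
      simp [hps]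

lemma J_eq (lines : List String) :
    aGo lines 0 [] false = (J lines).map Int.ofNat := by
  have h := aGo_filter lines lines.length 0 (by omega)
  simpa [pvPrev, J, List.range_eq_range'] using h

lemma altGo_spec (lines : List String) : ∀ (i : Nat), i ≤ lines.length → ∀ (acc : Option Int),
    altGo lines i acc
      = bSpec lines (((List.range' 0 i).filter (pstart lines)).reverse) acc := by
  intro i
  induction i with
  | zero => intro _ acc; cases acc <;> simp [altGo, bSpec]
  | succ i ih =>
    intro hle acc
    have hrange : List.range' 0 (i + 1) = List.range' 0 i ++ [i] := by
      have h := List.range'_concat (s := 0) (n := i) (step := 1)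
      simpa using h
    have hcond : (PySem.Str.strip (lines.getD i "") ≠ "" ∧
        (i = 0 ∨ ¬ PySem.Str.strip (lines.getD (i - 1) "") ≠ "")) ↔ pstart lines i = true := by
      unfold pstart nb
      by_cases h0 : i = 0 <;> simp [h0]
    rw [hrange]
    by_cases hp : pstart lines i = true
    · have hc : PySem.Str.strip (lines.getD i "") ≠ "" ∧
          (i = 0 ∨ ¬ PySem.Str.strip (lines.getD (i - 1) "") ≠ "") := hcond.mpr hp
      cases acc with
      | some j =>
        simp only [altGo, if_pos hc]
        simp [List.filter_append, hp, bSpec]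
      | none =>
        simp only [altGo, if_pos hc]
        rw [ih (by omega) (some (i : Int))]
        simp only [List.filter_append, List.filter_cons, hp, List.filter_nil,
          List.reverse_append]
        cases hR : ((List.range' 0 i).filter (pstart lines)).reverse with
        | nil => simp [bSpec]
        | cons a t => simp [bSpec]
    · have hc : ¬ (PySem.Str.strip (lines.getD i "") ≠ "" ∧
          (i = 0 ∨ ¬ PySem.Str.strip (lines.getD (i - 1) "") ≠ "")) := by
        rw [hcond]; simp [hp]
      simp only [altGo, if_neg hc]
      rw [ih (by omega) acc]
      simp [List.filter_append, hp]

lemma alt_eq (lines : List String) :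
    find_second_last_para_alt lines = bSpec lines ((J lines).reverse) none := by
  rw [find_second_last_para_alt, altGo_spec lines lines.length le_rfl none]
  simp [J, List.range_eq_range']

-- ===== VERDICT (by name: the statement is the Claim_ definition above) =====
theorem find_second_last_para_spec : Claim_equal_find_second_last_para := by
  intro lines _
  unfold Spec_find_second_last_para
  rw [alt_eq, find_second_last_para, J_eq]
  set Jl := J lines with hJ
  cases hR : Jl.reverse with
  | nil =>
    have h0 : Jl = [] := by simpa using congrArg List.reverse hR
    simp [h0, bSpec]
  | cons j1 t =>
    have hJl : Jl = (j1 :: t).reverse := by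
      rw [← hR]; simp
    cases t with
    | nil =>
      simp only [hJl]
      simp [bSpec]
    | cons j2 t' =>
      have hlen : Jl.length = t'.length + 2 := by
        rw [hJl]; simp
      have hlen2 : ((Jl.map Int.ofNat).length) = t'.length + 2 := by
        simp [hlen]
      simp only [hlen2, if_pos (by omega : t'.length + 2 ≥ 2)]
      have hidx : t'.length + 2 - 2 = t'.length := by omega
      have hget : Jl.getD t'.length 0 = j2 := by
        rw [hJl]
        have heq : (j1 :: j2 :: t').reverse = t'.reverse ++ [j2, j1] := by simp
        rw [heq]
        have h1 : t'.length < (t'.reverse ++ [j2, j1]).length := by simp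
        rw [List.getD_eq_getElem _ _ h1]
        rw [List.getElem_append_right (by simp)]
        simp
      rw [hidx]
      have hmap : (Jl.map Int.ofNat).getD t'.length 0 = Int.ofNat (Jl.getD t'.length 0) := by
        have ht : t'.length < Jl.length := by omega
        rw [List.getD_eq_getElem _ _ (by simpa using ht), List.getD_eq_getElem _ _ ht]
        simp
      rw [hmap, hget]
      simp [bSpec]
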